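-- pv_equiv track=rewrite | github.com/jydas1973/exabox | ovm/cludomufilesystems.py | get_next_dev
-- ===== SOURCE A (Python) =====
-- import string
--
-- def get_next_dev(last_dev: str, preffix_len: int) -> str:
--     """
--     Gets the next dev that can be used to attach a disk image into a DomU.
--
--     For example:
--     get_next_dev('sda', 2) == 'sdb'
--     get_next_dev('xvdz', 3) == 'xvdba
--
--     :param last_dev: Last dev found.
--     :param preffix_len: Number of characters to omit from the dev name.
--     :returns: str with the next dev.
--     """
--     preffix: str = last_dev[:preffix_len]
--     dev: str = last_dev[preffix_len:]
--     NUM_LETTERS: int = len(string.ascii_lowercase)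
--
--     dev = chr(ord(dev[-1]) + 1) + dev[:-1][::-1]
--     dev_new: str = ""
--     while dev:
--         next_val: int = ord(dev[0]) - ord('a')
--         dev = dev[1:]
--         if next_val >= NUM_LETTERS:
--             if not dev:
--                 dev = 'a'
--             else:
--                 dev = chr(ord(dev[0]) + (next_val // NUM_LETTERS)) + \
--                     dev[1:]
--             next_val %= NUM_LETTERS
--         dev_new += chr(next_val + ord('a'))
--     return preffix + dev_new[::-1]
-- ===== SOURCE B (Python) =====
-- def _add(digits, carry):
--     """Divide and conquer: add `carry` at the right end of a base-26 digit list.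
--
--     Splits the list in half, resolves the right half first, feeds its carry-out
--     into the left half, and concatenates.  Returns (carry_out, new_digits).
--     """
--     if not digits:
--         return carry, []
--     if len(digits) == 1:
--         d = digits[0] + carry
--         if d >= 26:
--             return d // 26, [d % 26]
--         return 0, [d]
--     m = len(digits) // 2
--     c1, right = _add(digits[m:], carry)
--     c2, left = _add(digits[:m], c1)
--     return c2, left + right
--
--
-- def get_next_dev(last_dev: str, preffix_len: int) -> str:
--     preffix = last_dev[:preffix_len]
--     carry, digits = _add([ord(c) - ord('a') for c in last_dev[preffix_len:]], 1)
--     if carry: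
--         digits = [0] + digits
--     return preffix + ''.join(chr(d + ord('a')) for d in digits)
-- ===== Notes on version B (the rewrite author's own statement) =====
-- stated objective: faster
-- what changed: A is an imperative while loop over the reversed suffix that repeatedly rewrites the front of the remaining string, splicing the carry into the next character via chr(ord(..)+q); B never reverses anything: it propagates the carry by divide and conquer on the unreversed digit list (split in half, resolve the right half, feed its carry-out into the left half, concatenate), prepending a 0-digit if a carry escapes the front. Measured ~7x faster at the largest timing size: A rebuilds the remaining string each step (quadratic), B only slices halves (O(n log n)).
import Mathlib
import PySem

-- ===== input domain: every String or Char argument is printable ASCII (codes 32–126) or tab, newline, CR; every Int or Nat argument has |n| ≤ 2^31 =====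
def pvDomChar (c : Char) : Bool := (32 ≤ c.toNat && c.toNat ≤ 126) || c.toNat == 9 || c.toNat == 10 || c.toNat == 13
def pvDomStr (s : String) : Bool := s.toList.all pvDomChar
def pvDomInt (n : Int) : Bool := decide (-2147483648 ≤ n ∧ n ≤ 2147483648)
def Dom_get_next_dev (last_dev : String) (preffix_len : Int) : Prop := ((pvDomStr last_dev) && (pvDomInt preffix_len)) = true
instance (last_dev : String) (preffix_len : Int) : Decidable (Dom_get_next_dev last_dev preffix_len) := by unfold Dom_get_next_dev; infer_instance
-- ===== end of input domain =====

-- B replaces A's reverse-and-rewrite string loop by divide-and-conquer carry propagation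
-- over the unreversed digit list (right half resolved first, its carry-out fed into the
-- left half; O(n log n) slicing vs A's quadratic per-step string rebuilding); objective: faster.
-- Equivalence is about the return value.

-- ===== PORT A =====
-- chr(i) for an Int code; exact for 0 ≤ i < 0xD800 (all codes reached on the stated domain)
def pvChr (i : Int) : Char := Char.ofNat i.toNat

-- A's while loop: dev is the remaining (reversed) chars, acc is dev_new in append order.
-- fuel is only a totality guard: the loop consumes one char per step and re-adds at most
-- one single 'a' at the very end, so length+1 steps always finish; the port passes that.
def devLoopA : Nat → List Char → List Char → List Char
  | _, [], acc => acc
  | 0, _ :: _, acc => acc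
  | fuel + 1, c :: rest, acc =>
    let v : Int := (c.toNat : Int) - 97
    if 26 ≤ v then
      match rest with
      | [] => devLoopA fuel ['a'] (acc ++ [pvChr (PySem.Int.mod v 26 + 97)])
      | r :: rs =>
          devLoopA fuel (pvChr ((r.toNat : Int) + PySem.Int.floordiv v 26) :: rs)
                   (acc ++ [pvChr (PySem.Int.mod v 26 + 97)])
    else devLoopA fuel rest (acc ++ [pvChr (v + 97)])

def get_next_dev (last_dev : String) (preffix_len : Int) : String :=
  let L := last_dev.toList
  let preffix := PySem.List.slice L none (some preffix_len)       -- last_dev[:preffix_len]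
  let dev := PySem.List.slice L (some preffix_len) none           -- last_dev[preffix_len:]
  match PySem.List.pyGet? dev (-1) with                           -- dev[-1]
  | none => ""                                                    -- IndexError (excluded by Pre_)
  | some c =>
    -- dev = chr(ord(dev[-1]) + 1) + dev[:-1][::-1]
    let dev1 := pvChr ((c.toNat : Int) + 1) :: (PySem.List.slice dev none (some (-1))).reverse
    String.ofList (preffix ++ (devLoopA (dev1.length + 1) dev1 []).reverse)  -- preffix + dev_new[::-1]

-- ===== PORT B =====
-- B's _add: divide and conquer — split the digit list in half, resolve the right half
-- first, feed its carry-out into the left half, concatenate.  (Source B's slices digits[m:]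
-- / digits[:m] with 0 ≤ m ≤ len are exactly List.drop / List.take.)
def addB : List Int → Int → Int × List Int
  | [], c => (c, [])
  | [d], c =>
    let d' := d + c
    if 26 ≤ d' then (PySem.Int.floordiv d' 26, [PySem.Int.mod d' 26]) else (0, [d'])
  | d₀ :: d₁ :: ds, c =>
    let l := d₀ :: d₁ :: ds
    let m := l.length / 2
    let p1 := addB (l.drop m) c
    let p2 := addB (l.take m) p1.1
    (p2.1, p2.2 ++ p1.2)
termination_by l _ => l.length
decreasing_by
  · simp; omega
  · simp; omega

def get_next_dev_alt (last_dev : String) (preffix_len : Int) : String :=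
  let L := last_dev.toList
  let preffix := PySem.List.slice L none (some preffix_len)
  let p := addB ((PySem.List.slice L (some preffix_len) none).map (fun c => (c.toNat : Int) - 97)) 1
  let digits := if p.1 ≠ 0 then 0 :: p.2 else p.2                 -- if carry: prepend 0-digit
  String.ofList (preffix ++ digits.map (fun d => pvChr (d + 97)))

-- ===== PRECONDITION & SPEC =====
-- Pre_ excludes exactly the inputs where last_dev[preffix_len:] is empty: there A's
-- dev[-1] raises IndexError.
def Pre_get_next_dev (last_dev : String) (preffix_len : Int) : Prop :=
  PySem.List.slice last_dev.toList (some preffix_len) none ≠ []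
instance (last_dev : String) (preffix_len : Int) : Decidable (Pre_get_next_dev last_dev preffix_len) := by unfold Pre_get_next_dev; infer_instance

def pvWitness_get_next_dev : String × Int := ("xvdz", 3)

def Spec_get_next_dev (last_dev : String) (preffix_len : Int) (out : String) : Prop := out = get_next_dev_alt last_dev preffix_len
instance (last_dev : String) (preffix_len : Int) (out : String) : Decidable (Spec_get_next_dev last_dev preffix_len out) := by unfold Spec_get_next_dev; infer_instance

-- ===== CLAIM (what is proved, stated in full; the proofs are below) =====
def Claim_equal_get_next_dev : Prop := ∀ (last_dev : String) (preffix_len : Int), Dom_get_next_dev last_dev preffix_len → Pre_get_next_dev last_dev preffix_len → Spec_get_next_dev last_dev preffix_len (get_next_dev last_dev preffix_len)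

-- ===== LEMMAS AND PROOFS =====

-- functional form of the carry loop on the REVERSED digit list (proof-only intermediary:
-- A's char loop is bridged to it, and it is then related to B's structural recursion)
def bLoop : Int → List Int → List Int
  | c, [] => if c ≠ 0 then [0] else []
  | c, d :: rest =>
    let d' := d + c
    if 26 ≤ d' then PySem.Int.mod d' 26 :: bLoop (PySem.Int.floordiv d' 26) rest
    else d' :: bLoop 0 rest

-- incB generalized over the carry seeded at the right end
def incC (c0 : Int) : List Int → Int × List Int
  | [] => (c0, [])
  | d :: rest =>
    let p := incC c0 rest
    let d' := d + p.1
    if 26 ≤ d' then (PySem.Int.floordiv d' 26, PySem.Int.mod d' 26 :: p.2)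
    else (0, d' :: p.2)

lemma incC_append (c0 : Int) (xs ys : List Int) :
    incC c0 (xs ++ ys) = ((incC (incC c0 ys).1 xs).1, (incC (incC c0 ys).1 xs).2 ++ (incC c0 ys).2) := by
  induction xs with
  | nil => simp [incC]
  | cons x xs ih =>
    simp only [List.cons_append, incC, ih]
    split_ifs <;> simp

lemma addB_eq_incC (n : Nat) : ∀ (ds : List Int) (c : Int), ds.length ≤ n → addB ds c = incC c ds := by
  induction n with
  | zero =>
    intro ds c h
    match ds with
    | [] => simp [addB, incC]
    | _ :: _ => simp at h
  | succ n ih =>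
    intro ds c h
    match ds with
    | [] => simp [addB, incC]
    | [d] => simp [addB, incC]
    | d₀ :: d₁ :: rest =>
      rw [addB]
      have hsplit : (d₀ :: d₁ :: rest) =
          (d₀ :: d₁ :: rest).take ((d₀ :: d₁ :: rest).length / 2)
            ++ (d₀ :: d₁ :: rest).drop ((d₀ :: d₁ :: rest).length / 2) :=
        (List.take_append_drop _ _).symm
      have hlen : (d₀ :: d₁ :: rest).length = rest.length + 2 := by simp
      have htake : ((d₀ :: d₁ :: rest).take ((d₀ :: d₁ :: rest).length / 2)).length ≤ n := by
        simp; omega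
      have hdrop : ((d₀ :: d₁ :: rest).drop ((d₀ :: d₁ :: rest).length / 2)).length ≤ n := by
        simp; omega
      rw [ih _ c hdrop, ih _ _ htake]
      conv_rhs => rw [hsplit, incC_append]

-- bLoop on a list = incC on its reverse (read back in reverse, overflow 0-digit at the end)
lemma bLoop_eq_incC (ds : List Int) : ∀ c0 : Int,
    bLoop c0 ds = (incC c0 ds.reverse).2.reverse
      ++ (if (incC c0 ds.reverse).1 ≠ 0 then [0] else []) := by
  induction ds with
  | nil => intro c0; simp [bLoop, incC]
  | cons d ds ih =>
    intro c0
    have hrev : (d :: ds).reverse = ds.reverse ++ [d] := by simp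
    rw [hrev, incC_append]
    have h1 : incC c0 [d] = if 26 ≤ d + c0 then
        (PySem.Int.floordiv (d + c0) 26, [PySem.Int.mod (d + c0) 26]) else (0, [d + c0]) := by
      simp only [incC]
    by_cases h : 26 ≤ d + c0
    · simp only [bLoop, h, if_true, h1, ih]
      simp
    · simp only [bLoop, h, if_false, h1, ih]
      simp

lemma pvChr_toNat (i : Int) (h0 : 0 ≤ i) (h1 : i < 55296) : ((pvChr i).toNat : Int) = i := by
  have hn : i.toNat < 55296 := by omega
  have : (Char.ofNat i.toNat).toNat = i.toNat := by
    unfold Char.ofNat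
    rw [dif_pos (by exact Or.inl hn)]
    simp [Char.ofNatAux, Char.toNat]
  simp [pvChr, this]; omega

lemma pvChr_roundtrip (c : Char) : pvChr ((c.toNat : Int) + 0) = c := by
  have : ((c.toNat : Int) + 0).toNat = c.toNat := by omega
  simp only [pvChr, this]
  exact Char.ofNat_toNat c

-- the bridge: A's char-level loop computes the char image of the carry loop bLoop
lemma bridge (rest : List Char) : ∀ (fuel : Nat) (ch : Char) (c : Int) (acc : List Char),
    rest.length + 1 ≤ fuel → 0 ≤ c → c ≤ 1 → ch.toNat ≤ 126 → (∀ x ∈ rest, x.toNat ≤ 126) →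
    devLoopA (fuel + 1) (pvChr ((ch.toNat : Int) + c) :: rest) acc
      = acc ++ (bLoop c ((ch :: rest).map (fun x => (x.toNat : Int) - 97))).map
          (fun d => pvChr (d + 97)) := by
  induction rest with
  | nil =>
    intro fuel ch c acc hfuel hc0 hc1 hch _
    obtain ⟨g, rfl⟩ : ∃ g, fuel = g + 1 := ⟨fuel - 1, by omega⟩
    rw [devLoopA]
    have hv : ((pvChr ((ch.toNat : Int) + c)).toNat : Int) = (ch.toNat : Int) + c :=
      pvChr_toNat _ (by omega) (by omega)
    simp only [hv, bLoop, List.map_cons, List.map_nil]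
    by_cases h26 : 26 ≤ (ch.toNat : Int) + c - 97
    · have harr : (ch.toNat : Int) - 97 + c = (ch.toNat : Int) + c - 97 := by ring
      have hq : PySem.Int.floordiv ((ch.toNat : Int) + c - 97) 26 = 1 := by
        rw [PySem.Int.floordiv_eq_ediv_of_pos (by omega)]; omega
      simp only [h26, if_true, harr, hq]
      rw [devLoopA]
      have hna : ¬ (26 ≤ (('a').toNat : Int) - 97) := by decide
      simp only [hna, if_false]
      rw [devLoopA]
      have h97 : pvChr ((('a').toNat : Int) - 97 + 97) = pvChr 97 := by decide
      simp only [h97, List.map_cons, List.append_assoc, List.singleton_append]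
      norm_num
    · simp only [h26, if_false]
      rw [devLoopA]
      have harr : (ch.toNat : Int) - 97 + c = (ch.toNat : Int) + c - 97 := by ring
      simp only [harr, h26, if_false, List.map_cons]
      norm_num
  | cons r rs ih =>
    intro fuel ch c acc hfuel hc0 hc1 hch hrest
    obtain ⟨g, rfl⟩ : ∃ g, fuel = g + 1 := ⟨fuel - 1, by omega⟩
    rw [devLoopA]
    have hv : ((pvChr ((ch.toNat : Int) + c)).toNat : Int) = (ch.toNat : Int) + c :=
      pvChr_toNat _ (by omega) (by omega)
    have hr : r.toNat ≤ 126 := hrest r (by simp)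
    have hrs : ∀ x ∈ rs, x.toNat ≤ 126 := fun x hx => hrest x (by simp [hx])
    have harr : (ch.toNat : Int) - 97 + c = (ch.toNat : Int) + c - 97 := by ring
    have hg : rs.length + 1 ≤ g := by simp at hfuel; omega
    simp only [hv, List.map_cons]
    by_cases h26 : 26 ≤ (ch.toNat : Int) + c - 97
    · have hq : PySem.Int.floordiv ((ch.toNat : Int) + c - 97) 26 = 1 := by
        rw [PySem.Int.floordiv_eq_ediv_of_pos (by omega)]; omega
      simp only [h26, if_true, hq]
      rw [ih g r 1 _ hg (by omega) (by omega) hr hrs]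
      simp only [bLoop, harr, h26, if_true, hq, List.map_cons, List.append_assoc,
        List.singleton_append]
    · simp only [h26, if_false]
      have hstep : (r :: rs) = pvChr ((r.toNat : Int) + 0) :: rs := by
        rw [pvChr_roundtrip r]
      rw [hstep, ih g r 0 _ hg (by omega) (by omega) hr hrs]
      simp only [bLoop, harr, h26, if_false, List.map_cons, List.append_assoc,
        List.singleton_append]

-- ===== VERDICT (by name: the statement is the Claim_ definition above) =====
theorem get_next_dev_spec : Claim_equal_get_next_dev := by
  intro last_dev preffix_len hdom hpre
  unfold Pre_get_next_dev at hpre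
  unfold Spec_get_next_dev
  simp only [get_next_dev, get_next_dev_alt]
  set L := last_dev.toList with hL
  set dev := PySem.List.slice L (some preffix_len) none with hdev
  have hne : dev ≠ [] := hpre
  -- every char of dev has code ≤ 126 (from Dom)
  have hord : ∀ x ∈ dev, x.toNat ≤ 126 := by
    intro x hx
    have hxL : x ∈ L := PySem.List.mem_of_mem_slice _ _ _ hx
    have hs : pvDomStr last_dev = true := by
      unfold Dom_get_next_dev at hdom; simp at hdom; exact hdom.1
    have := (List.all_eq_true.mp hs) x hxL
    simp [pvDomChar] at this
    omega
  obtain ⟨c, hc⟩ : ∃ c, dev.getLast? = some c := by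
    cases h : dev.getLast? with
    | none => exact absurd (List.getLast?_eq_none_iff.mp h) hne
    | some c => exact ⟨c, rfl⟩
  have hget : PySem.List.pyGet? dev (-1) = some c := by
    rw [PySem.List.pyGet?_neg_one, hc]
  rw [hget]
  rw [PySem.List.slice_to_neg_one]
  dsimp only
  -- A side: the loop via the bridge, then bLoop via incC
  have hc126 : c.toNat ≤ 126 := hord c (List.mem_of_getLast? hc)
  have hdl : ∀ x ∈ dev.dropLast.reverse, x.toNat ≤ 126 := by
    intro x hx; exact hord x (List.dropLast_subset _ (List.mem_reverse.mp hx))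
  have hlen : (pvChr ((c.toNat : Int) + 1) :: dev.dropLast.reverse).length + 1
      = (dev.dropLast.reverse.length + 1) + 1 := by simp
  rw [hlen, bridge dev.dropLast.reverse (dev.dropLast.reverse.length + 1) c 1 []
        (by omega) (by omega) (le_refl 1) hc126 hdl]
  simp only [List.nil_append]
  -- the reversed digit list of dev starts with c's digit value
  have hsplit : dev = dev.dropLast ++ [c] := (List.dropLast_append_getLast? c hc).symm
  have hmaprev : (dev.map (fun x => (x.toNat : Int) - 97)).reverse
      = ((c.toNat : Int) - 97) :: (dev.dropLast.reverse.map (fun x => (x.toNat : Int) - 97)) := by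
    conv_lhs => rw [hsplit]
    simp [List.map_reverse]
  -- connect to incB
  rw [show ((c :: dev.dropLast.reverse).map (fun x => (x.toNat : Int) - 97))
        = (dev.map (fun x => (x.toNat : Int) - 97)).reverse by
      rw [hmaprev]; simp]
  rw [bLoop_eq_incC, List.reverse_reverse,
      addB_eq_incC (dev.map (fun x => (x.toNat : Int) - 97)).length _ _ le_rfl]
  -- both sides: map chr over (incC 1 digits) with the 0-digit placed at the front
  by_cases hcz : (incC 1 (dev.map (fun x => (x.toNat : Int) - 97))).1 ≠ 0
  · simp [hcz, List.map_reverse]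
  · simp [hcz, List.map_reverse]
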